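-- pv_equiv track=rewrite | github.com/pypi-data/pypi-mirror-274 | packages/ToolBiox/ToolBiox-0.0.46-py3-none-any.whl/toolbiox/api/xuyuxing/genome/repeat_anno.py | seq_split_by_star
-- ===== SOURCE A (Python) =====
-- def seq_split_by_star(sequence):
--     range_list = []
--     start = 0
--     end = 0
--     for i in range(0, len(sequence)):
--         if sequence[i] == '*':
--             end = i - 1
--             if i == start:
--                 start = i + 1
--                 continue
--             range_list.append((start, end))
--             start = i + 1
--             end = i + 1
--         if sequence[i] != '*' and i == len(sequence) - 1:
--             range_list.append((start, i))
--
--     output_list = []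
--     for i in range_list:
--         output_list.append((i[0] + 1, i[1] + 1))
--
--     return output_list
-- ===== SOURCE B (Python) =====
-- def seq_split_by_star(sequence):
--     stars = [i for i, c in enumerate(sequence) if c == '*']
--     bounds = [-1] + stars + [len(sequence)]
--     out = []
--     for p, q in zip(bounds, bounds[1:]):
--         if q - p > 1:
--             out.append((p + 2, q))
--     return out
-- ===== Notes on version B (the rewrite author's own statement) =====
-- stated objective: alternative
-- what changed: Replaces A's running start/end state machine plus second offset loop by an index-then-gaps decomposition: collect all asterisk positions once, add -1 and the sequence length as sentinel bounds, and emit (p+2, q) for each consecutive bound pair with a non-empty gap.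
import Mathlib
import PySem

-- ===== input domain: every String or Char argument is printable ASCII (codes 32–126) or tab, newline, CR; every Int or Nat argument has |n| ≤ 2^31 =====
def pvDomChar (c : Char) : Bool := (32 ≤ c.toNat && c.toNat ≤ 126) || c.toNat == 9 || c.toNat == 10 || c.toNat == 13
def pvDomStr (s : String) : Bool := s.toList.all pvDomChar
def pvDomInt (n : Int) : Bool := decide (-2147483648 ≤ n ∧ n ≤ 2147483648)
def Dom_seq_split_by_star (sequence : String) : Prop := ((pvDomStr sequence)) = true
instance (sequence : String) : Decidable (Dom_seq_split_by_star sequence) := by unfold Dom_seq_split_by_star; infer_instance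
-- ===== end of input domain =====

-- B replaces A's running start/end state machine by a star-index-then-gaps scan; same O(n) cost, different decomposition.

-- ===== PORT A =====
-- A's 'for i in range(0, len(sequence))' with 'sequence[i]': structural recursion
-- over the characters paired with their index i (exact: i is always in range).
-- State is (range_list, start, end), exactly A's variables; n = len(sequence).
def seqLoopA (l : List Char) (i : Nat) (n : Nat)
    (acc : List (Int × Int)) (start e : Int) : List (Int × Int) :=
  match l with
  | [] => acc
  | c :: rest =>
    if c = '*' then
      -- end = i - 1; if i == start: start = i + 1; continue
      if (i : Int) = start then
        seqLoopA rest (i + 1) n acc ((i : Int) + 1) ((i : Int) - 1)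
      else
        -- range_list.append((start, end)); start = i + 1; end = i + 1
        seqLoopA rest (i + 1) n (acc ++ [(start, (i : Int) - 1)]) ((i : Int) + 1) ((i : Int) + 1)
    else
      -- if sequence[i] != '*' and i == len(sequence) - 1: append((start, i))
      if (i : Int) = (n : Int) - 1 then
        seqLoopA rest (i + 1) n (acc ++ [(start, (i : Int))]) start e
      else
        seqLoopA rest (i + 1) n acc start e

def seq_split_by_star (sequence : String) : List (Int × Int) :=
  let l := sequence.toList
  let range_list := seqLoopA l 0 l.length [] 0 0
  range_list.map (fun p => (p.1 + 1, p.2 + 1))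

-- ===== PORT B =====
-- [i for i, c in enumerate(sequence) if c == '*'] : recursion with running index
def starsB (l : List Char) (i : Nat) : List Int :=
  match l with
  | [] => []
  | c :: rest => if c = '*' then (i : Int) :: starsB rest (i + 1) else starsB rest (i + 1)

def seq_split_by_star_alt (sequence : String) : List (Int × Int) :=
  let l := sequence.toList
  let stars := starsB l 0
  let bounds := (-1 : Int) :: (stars ++ [(l.length : Int)])
  (bounds.zip bounds.tail).foldl
    (fun out pq => if pq.2 - pq.1 > 1 then out ++ [(pq.1 + 2, pq.2)] else out) []

-- ===== PRECONDITION & SPEC =====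
def Spec_seq_split_by_star (sequence : String) (out : List (Int × Int)) : Prop := out = seq_split_by_star_alt sequence
instance (sequence : String) (out : List (Int × Int)) : Decidable (Spec_seq_split_by_star sequence out) := by unfold Spec_seq_split_by_star; infer_instance

-- ===== CLAIM (what is proved, stated in full; the proofs are below) =====
def Claim_equal_seq_split_by_star : Prop := ∀ (sequence : String), Dom_seq_split_by_star sequence → Spec_seq_split_by_star sequence (seq_split_by_star sequence)

-- ===== LEMMAS AND PROOFS =====

-- Reference splitter: ranges (0-based, un-shifted) produced from index i with current start.
def spec (l : List Char) (i : Nat) (start : Int) : List (Int × Int) :=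
  match l with
  | [] => []
  | c :: rest =>
    if c = '*' then
      (if (i : Int) = start then [] else [(start, (i : Int) - 1)]) ++ spec rest (i + 1) ((i : Int) + 1)
    else
      if rest = [] then [(start, (i : Int))] else spec rest (i + 1) start

-- Gap scan over the bound list (proof-side view of B's zip/fold loop).
def pairScan (p : Int) (bs : List Int) : List (Int × Int) :=
  match bs with
  | [] => []
  | q :: rest => (if q - p > 1 then [(p + 2, q)] else []) ++ pairScan q rest

theorem seqLoopA_eq_spec (l : List Char) (i n : Nat) (acc : List (Int × Int)) (start e : Int)
    (h : i + l.length = n) :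
    seqLoopA l i n acc start e = acc ++ spec l i start := by
  induction l generalizing i acc start e with
  | nil => simp [seqLoopA, spec]
  | cons c rest ih =>
    have h' : (i + 1) + rest.length = n := by simp only [List.length_cons] at h; omega
    by_cases hc : c = '*'
    · by_cases hs : (i : Int) = start
      · simp [seqLoopA, spec, hc, hs, ih _ _ _ _ h']
      · simp [seqLoopA, spec, hc, hs, ih _ _ _ _ h']
    · have hlast : ((i : Int) = (n : Int) - 1) ↔ rest = [] := by
        constructor
        · intro hi
          have : rest.length = 0 := by simp only [List.length_cons] at h; omega
          simpa [List.length_eq_zero_iff] using this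
        · intro hr; subst hr; simp at h; omega
      by_cases hr : rest = []
      · subst hr
        simp [seqLoopA, spec, hc, hlast.mpr rfl]
      · have hni : ¬ ((i : Int) = (n : Int) - 1) := fun hh => hr (hlast.mp hh)
        simp [seqLoopA, spec, hc, hni, hr, ih _ _ _ _ h']

theorem pairScan_eq_spec (l : List Char) (i : Nat) (start : Int)
    (h0 : 0 ≤ start) (hle : start ≤ (i : Int)) (hnil : l = [] → (i : Int) = start) :
    pairScan (start - 1) (starsB l i ++ [((i + l.length : Nat) : Int)]) =
      (spec l i start).map (fun p => (p.1 + 1, p.2 + 1)) := by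
  induction l generalizing i start with
  | nil =>
    have := hnil rfl
    have hne : ¬ ((i : Int) - (start - 1) > 1) := by omega
    simp [starsB, pairScan, spec, hne]
  | cons c rest ih =>
    have hn : i + (c :: rest).length = (i + 1) + rest.length := by
      simp only [List.length_cons]; omega
    rw [hn]
    by_cases hc : c = '*'
    · subst hc
      have H := ih (i + 1) ((i : Int) + 1) (by omega) (by push_cast; omega)
        (by intro hr; push_cast; ring)
      rw [show ((i : Int) + 1 - 1) = (i : Int) from by ring] at H
      by_cases hs : (i : Int) = start
      · subst hs
        simp [starsB, spec, pairScan]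
        simpa using H
      · have hyes : ((1 : Int) < (i : Int) - (start - 1)) := by omega
        simp only [starsB, spec, if_neg hs, List.cons_append, pairScan,
          hyes, ite_true, List.map_cons, List.nil_append, H]
        ring_nf
    · by_cases hr : rest = []
      · subst hr
        have hyes : ((1 : Int) < (i : Int) + 1 - (start - 1)) := by omega
        simp [starsB, spec, hc, pairScan, hyes]
        ring
      · have H := ih (i + 1) start h0 (by push_cast; omega) (fun hh => absurd hh hr)
        simp only [starsB, spec, if_neg hc, if_neg hr]
        exact H

theorem zipFold_eq_pairScan (bs : List Int) (p : Int) (out : List (Int × Int)) :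
    (((p :: bs).zip bs).foldl
      (fun out pq => if pq.2 - pq.1 > 1 then out ++ [(pq.1 + 2, pq.2)] else out) out) =
    out ++ pairScan p bs := by
  induction bs generalizing p out with
  | nil => simp [pairScan]
  | cons q rest ih =>
    simp only [List.zip_cons_cons, List.foldl_cons, pairScan]
    by_cases hq : q - p > 1
    · simp [hq, ih]
    · simp [hq, ih]

-- ===== VERDICT (by name: the statement is the Claim_ definition above) =====
theorem seq_split_by_star_spec : Claim_equal_seq_split_by_star := by
  intro sequence _
  show seq_split_by_star sequence = seq_split_by_star_alt sequence
  unfold seq_split_by_star seq_split_by_star_alt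
  simp only []
  rw [seqLoopA_eq_spec _ 0 _ [] 0 0 (by simp), List.nil_append]
  simp only [List.tail_cons]
  rw [zipFold_eq_pairScan, List.nil_append]
  have := pairScan_eq_spec sequence.toList 0 0 (by omega) (by omega) (by intro _; simp)
  simpa using this.symm
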